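-- pv_equiv track=rewrite | github.com/jinjintaek/CodingTest_Python | 백준/Gold/1407. 2로 몇 번 나누어질까/2로 몇 번 나누어질까.py | sum_f
-- ===== SOURCE A (Python) =====
-- def sum_f(n):
--     if n == 0:
--         return 0
--
--     total = n
--
--     power = 1
--     while power * 2 <= n:
--
--         total += (n // (power * 2)) * power
--         power *= 2
--
--     return total
-- ===== SOURCE B (Python) =====
-- def sum_f(n):
--     if n < 2:
--         return n
--     return (n - n // 2) + 2 * sum_f(n // 2)
-- ===== Notes on version B (the rewrite author's own statement) =====
-- stated objective: simpler
-- what changed: Replaces the doubling-power accumulation loop by a three-line recursion on the floor-halved argument, via the identity F(n) = ceil-half(n) + twice F of the floor-half.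
import Mathlib
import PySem

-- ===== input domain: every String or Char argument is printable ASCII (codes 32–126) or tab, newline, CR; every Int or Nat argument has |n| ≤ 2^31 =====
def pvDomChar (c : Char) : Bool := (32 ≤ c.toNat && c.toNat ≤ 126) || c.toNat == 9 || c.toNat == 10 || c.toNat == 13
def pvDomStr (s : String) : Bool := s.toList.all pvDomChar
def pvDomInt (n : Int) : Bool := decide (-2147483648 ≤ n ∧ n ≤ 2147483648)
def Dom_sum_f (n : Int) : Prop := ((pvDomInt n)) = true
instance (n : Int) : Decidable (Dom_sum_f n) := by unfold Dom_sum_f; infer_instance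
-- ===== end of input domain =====

-- B replaces A's doubling-power accumulation loop by a short recursion on n // 2 (simpler decomposition, same cost).

-- ===== PORT A =====
-- A's while loop; the '0 < power' guard only makes the recursion total (power is always 1,2,4,… in A).
def sumLoopA (n total power : Int) : Int :=
  if h : 0 < power ∧ power * 2 ≤ n then
    sumLoopA n (total + PySem.Int.floordiv n (power * 2) * power) (power * 2)
  else total
termination_by (n - power).toNat
decreasing_by omega

def sum_f (n : Int) : Int :=
  if n = 0 then 0 else sumLoopA n n 1

-- ===== PORT B =====
def sum_f_alt (n : Int) : Int :=
  if n < 2 then n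
  else (n - PySem.Int.floordiv n 2) + 2 * sum_f_alt (PySem.Int.floordiv n 2)
termination_by n.toNat
decreasing_by
  rw [PySem.Int.floordiv_eq_ediv_of_pos (by norm_num : (0:Int) < 2)]
  omega

-- ===== PRECONDITION & SPEC =====
def Spec_sum_f (n : Int) (out : Int) : Prop := out = sum_f_alt n
instance (n : Int) (out : Int) : Decidable (Spec_sum_f n out) := by unfold Spec_sum_f; infer_instance

-- ===== CLAIM (what is proved, stated in full; the proofs are below) =====
def Claim_equal_sum_f : Prop := ∀ (n : Int), Dom_sum_f n → Spec_sum_f n (sum_f n)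

-- ===== LEMMAS AND PROOFS =====

theorem loopA_step (n t p : Int) (h : 0 < p ∧ p * 2 ≤ n) :
    sumLoopA n t p = sumLoopA n (t + PySem.Int.floordiv n (p * 2) * p) (p * 2) := by
  conv_lhs => rw [sumLoopA]
  simp [h]

theorem loopA_stop (n t p : Int) (h : ¬ (0 < p ∧ p * 2 ≤ n)) :
    sumLoopA n t p = t := by
  conv_lhs => rw [sumLoopA]
  simp [h]

-- The accumulator is purely additive.
theorem loop_shift : ∀ (k : Nat) (n t p : Int), (n - p).toNat = k → 0 < p →
    sumLoopA n t p = t + sumLoopA n 0 p := by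
  intro k
  induction k using Nat.strong_induction_on with
  | _ k ih =>
    intro n t p hk hp
    by_cases h : 0 < p ∧ p * 2 ≤ n
    · rw [loopA_step n t p h, loopA_step n 0 p h,
          ih (n - p * 2).toNat (by omega) n _ (p * 2) rfl (by omega),
          ih (n - p * 2).toNat (by omega) n (0 + _) (p * 2) rfl (by omega)]
      ring
    · rw [loopA_stop n t p h, loopA_stop n 0 p h]
      ring

-- Halving: the loop started at power 2p over n is twice the loop started at power p over n // 2.
theorem loop_double : ∀ (k : Nat) (n p : Int), (n - p).toNat = k → 0 < p →
    sumLoopA n 0 (p * 2) = 2 * sumLoopA (PySem.Int.floordiv n 2) 0 p := by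
  intro k
  induction k using Nat.strong_induction_on with
  | _ k ih =>
    intro n p hk hp
    have h2 : PySem.Int.floordiv n 2 = n / 2 :=
      PySem.Int.floordiv_eq_ediv_of_pos (by norm_num)
    by_cases h : p * 2 * 2 ≤ n
    · have hcn : (0 < p * 2 ∧ p * 2 * 2 ≤ n) := ⟨by omega, h⟩
      have hcm : (0 < p ∧ p * 2 ≤ PySem.Int.floordiv n 2) := ⟨hp, by rw [h2]; omega⟩
      have hdd : PySem.Int.floordiv (PySem.Int.floordiv n 2) (p * 2)
          = PySem.Int.floordiv n (p * 2 * 2) := by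
        rw [h2, PySem.Int.floordiv_eq_ediv_of_pos (by omega : (0:Int) < p * 2),
            PySem.Int.floordiv_eq_ediv_of_pos (by omega : (0:Int) < p * 2 * 2),
            Int.ediv_ediv_of_nonneg (by norm_num : (0:Int) ≤ 2),
            show (2 * (p * 2) : Int) = p * 2 * 2 by ring]
      have hL : sumLoopA n 0 (p * 2)
          = (0 + PySem.Int.floordiv n (p * 2 * 2) * (p * 2))
            + 2 * sumLoopA (PySem.Int.floordiv n 2) 0 (p * 2) := by
        rw [loopA_step n 0 (p * 2) hcn,
            loop_shift (n - p * 2 * 2).toNat n _ (p * 2 * 2) rfl (by omega),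
            ih (n - p * 2).toNat (by omega) n (p * 2) rfl (by omega)]
      have hR : sumLoopA (PySem.Int.floordiv n 2) 0 p
          = (0 + PySem.Int.floordiv n (p * 2 * 2) * p)
            + sumLoopA (PySem.Int.floordiv n 2) 0 (p * 2) := by
        rw [loopA_step _ 0 p hcm, hdd,
            loop_shift (PySem.Int.floordiv n 2 - p * 2).toNat _ _ (p * 2) rfl (by omega)]
      rw [hL, hR]
      ring
    · rw [loopA_stop n 0 (p * 2) (by omega),
          loopA_stop _ 0 p (by rw [h2]; omega)]
      ring

theorem main_eq : ∀ (k : Nat) (n : Int), n.toNat = k → sum_f n = sum_f_alt n := by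
  intro k
  induction k using Nat.strong_induction_on with
  | _ k ih =>
    intro n hk
    have h2 : PySem.Int.floordiv n 2 = n / 2 :=
      PySem.Int.floordiv_eq_ediv_of_pos (by norm_num)
    by_cases hn : n < 2
    · rw [sum_f_alt, if_pos hn]
      by_cases h0 : n = 0
      · simp [sum_f, h0]
      · rw [sum_f, if_neg h0, loopA_stop n n 1 (by omega)]
    · -- n ≥ 2
      have e12 : (1 : Int) * 2 = 2 := by norm_num
      have hmb : 1 ≤ PySem.Int.floordiv n 2 ∧ PySem.Int.floordiv n 2 < n := by
        rw [h2]; omega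
      have hA : sum_f n = (n + PySem.Int.floordiv n 2 * 1) + 2 * sumLoopA (PySem.Int.floordiv n 2) 0 1 := by
        rw [sum_f, if_neg (by omega), loopA_step n n 1 ⟨by norm_num, by omega⟩, e12,
            loop_shift (n - 2).toNat n _ 2 rfl (by norm_num)]
        have := loop_double (n - 1).toNat n 1 rfl (by norm_num)
        rw [e12] at this
        rw [this]
      have hAm : sum_f (PySem.Int.floordiv n 2)
          = PySem.Int.floordiv n 2 + sumLoopA (PySem.Int.floordiv n 2) 0 1 := by
        rw [sum_f, if_neg (by omega),
            loop_shift (PySem.Int.floordiv n 2 - 1).toNat _ _ 1 rfl (by norm_num)]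
      have hih : sum_f (PySem.Int.floordiv n 2) = sum_f_alt (PySem.Int.floordiv n 2) :=
        ih (PySem.Int.floordiv n 2).toNat (by omega) _ rfl
      rw [sum_f_alt, if_neg hn]
      rw [hA]
      linarith [hAm, hih]

-- ===== VERDICT (by name: the statement is the Claim_ definition above) =====
theorem sum_f_spec : Claim_equal_sum_f := by
  intro n _
  unfold Spec_sum_f
  exact main_eq n.toNat n rfl
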